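-- pv_equiv track=rewrite | github.com/xenonserge/rf433 | manchester.py | coder_manchester
-- ===== SOURCE A (Python) =====
-- def coder_manchester(binaire):
--     """
--     Code une chaîne binaire en une séquence Manchester.
--
--     Args:
--         binaire (str): La chaîne binaire d'entrée.
--
--     Returns:
--         str: La séquence Manchester correspondante ('L' pour long, 'S' pour short).
--     """
--     if not binaire:
--         return ""
--
--     manchester = ""
--     etat_precedent = binaire[0]
--
--     for bit in binaire:
--         if bit == etat_precedent:
--             manchester += "S"
--         else:
--             manchester += "L"
--             etat_precedent = bit
--
--     return manchester
-- ===== SOURCE B (Python) =====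
-- def coder_manchester(binaire):
--     # Run-length decomposition: the output is, per maximal run of equal
--     # characters, a boundary tag ('S' for the first run, 'L' after) followed
--     # by 'S' repeated for the rest of the run.
--     out = []
--     i = 0
--     n = len(binaire)
--     first = True
--     while i < n:
--         j = i + 1
--         while j < n and binaire[j] == binaire[i]:
--             j += 1
--         out.append(("S" if first else "L") + "S" * (j - i - 1))
--         first = False
--         i = j
--     return "".join(out)
-- ===== Notes on version B (the rewrite author's own statement) =====
-- stated objective: alternative
-- what changed: B replaces A's per-character stateful loop by a run-length decomposition: it scans maximal runs of equal characters with an index-jumping outer loop and emits one chunk per run (boundary tag plus 'S' repeated by string multiplication), joining the chunks at the end.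
import Mathlib
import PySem

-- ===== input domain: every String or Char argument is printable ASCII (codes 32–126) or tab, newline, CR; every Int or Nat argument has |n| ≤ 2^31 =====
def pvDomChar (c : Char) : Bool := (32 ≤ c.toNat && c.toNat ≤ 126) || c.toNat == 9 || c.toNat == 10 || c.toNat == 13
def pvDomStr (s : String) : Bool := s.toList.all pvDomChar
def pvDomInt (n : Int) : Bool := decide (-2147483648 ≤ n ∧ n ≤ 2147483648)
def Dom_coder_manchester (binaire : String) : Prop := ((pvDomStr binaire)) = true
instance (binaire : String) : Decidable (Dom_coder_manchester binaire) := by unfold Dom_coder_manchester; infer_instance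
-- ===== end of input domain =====

-- B changes: run-length decomposition (one chunk per maximal run of equal characters)
-- instead of A's per-character loop with a mutable previous-state variable (objective: alternative).

-- ===== PORT A =====
def coderAux (acc : List Char) (etat : Char) : List Char → List Char
  | [] => acc
  | bit :: rest =>
    if bit = etat then coderAux (acc ++ ['S']) etat rest
    else coderAux (acc ++ ['L']) bit rest

def coder_manchester (binaire : String) : String :=
  match binaire.toList with
  | [] => ""
  | c0 :: _ => String.ofList (coderAux [] c0 binaire.toList)

-- ===== PORT B =====
-- outer while loop: one step per maximal run; the inner 'while binaire[j] == binaire[i]'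
-- scan is the takeWhile/dropWhile split of the rest at the run's character.
def coderRuns (first : Bool) (l : List Char) : List Char :=
  match l with
  | [] => []
  | c :: rest =>
    ((if first then 'S' else 'L') :: List.replicate (rest.takeWhile (· = c)).length 'S')
      ++ coderRuns false (rest.dropWhile (· = c))
termination_by l.length
decreasing_by
  simpa using Nat.lt_succ_of_le (List.length_dropWhile_le _ _)

def coder_manchester_alt (binaire : String) : String :=
  String.ofList (coderRuns true binaire.toList)

-- ===== PRECONDITION & SPEC =====
def Spec_coder_manchester (binaire : String) (out : String) : Prop := out = coder_manchester_alt binaire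
instance (binaire : String) (out : String) : Decidable (Spec_coder_manchester binaire out) := by unfold Spec_coder_manchester; infer_instance

-- ===== CLAIM (what is proved, stated in full; the proofs are below) =====
def Claim_equal_coder_manchester : Prop := ∀ (binaire : String), Dom_coder_manchester binaire → Spec_coder_manchester binaire (coder_manchester binaire)

-- ===== LEMMAS AND PROOFS =====

theorem coderAux_acc (acc : List Char) (e : Char) (l : List Char) :
    coderAux acc e l = acc ++ coderAux [] e l := by
  induction l generalizing acc e with
  | nil => simp [coderAux]
  | cons b rest ih =>
    rw [coderAux, coderAux]
    by_cases h : b = e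
    · rw [if_pos h, if_pos h, ih (acc ++ ['S']), ih ([] ++ ['S']), List.nil_append,
        List.append_assoc]
    · rw [if_neg h, if_neg h, ih (acc ++ ['L']), ih ([] ++ ['L']), List.nil_append,
        List.append_assoc]

theorem coderAux_step (e b : Char) (rest : List Char) :
    coderAux [] e (b :: rest) = (if b = e then 'S' else 'L') :: coderAux [] b rest := by
  rw [coderAux]
  by_cases h : b = e
  · rw [if_pos h, if_pos h, List.nil_append, coderAux_acc, h]; rfl
  · rw [if_neg h, if_neg h, List.nil_append, coderAux_acc]; rfl

-- the tail of A's output after a run boundary, as a function of the remaining list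
def auxTail : List Char → List Char
  | [] => []
  | d :: r => 'L' :: coderAux [] d r

theorem coderAux_run (c : Char) (l : List Char) :
    coderAux [] c l =
      List.replicate (l.takeWhile (· = c)).length 'S' ++ auxTail (l.dropWhile (· = c)) := by
  induction l generalizing c with
  | nil => simp [coderAux, auxTail]
  | cons b rest ih =>
    rw [coderAux_step]
    by_cases h : b = c
    · subst h
      simp [List.takeWhile, List.dropWhile, List.replicate_succ, ih]
    · simp [List.takeWhile, List.dropWhile, h, auxTail]

theorem coderRuns_false_eq (n : Nat) (l : List Char) (hn : l.length ≤ n) :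
    coderRuns false l = auxTail l := by
  induction n generalizing l with
  | zero =>
    cases l with
    | nil => simp [coderRuns, auxTail]
    | cons c rest => simp at hn
  | succ n ih =>
    cases l with
    | nil => simp [coderRuns, auxTail]
    | cons c rest =>
      rw [coderRuns, auxTail, coderAux_run,
        ih (rest.dropWhile (· = c)) (le_trans (List.length_dropWhile_le _ _) (Nat.le_of_succ_le_succ hn))]
      rfl

-- ===== VERDICT (by name: the statement is the Claim_ definition above) =====
theorem coder_manchester_spec : Claim_equal_coder_manchester := by
  intro binaire _
  unfold Spec_coder_manchester coder_manchester coder_manchester_alt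
  cases h : binaire.toList with
  | nil => simp [coderRuns]
  | cons c0 rest =>
    simp only [coderAux_run,
      coderRuns_false_eq (rest.dropWhile (· = c0)).length _ le_rfl, coderRuns]
    simp [List.takeWhile_cons, List.dropWhile_cons, List.replicate_succ]
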